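-- pv_equiv track=rewrite | github.com/FarahAlFahim/context-engineering-v2 | scripts/build_code_and_call_graphs.py | derive_call_graph
-- ===== SOURCE A (Python) =====
-- from typing import Dict, List, Tuple, Optional
--
-- NODE_TYPE_CLASS = 'class'
--
-- NODE_TYPE_FUNCTION = 'function'
--
-- EDGE_TYPE_INVOKES = 'invokes'
--
-- def derive_call_graph(graph_nodes: Dict, graph_edges: List[Dict]):
--     method_nodes = [nid for nid, nd in graph_nodes.items() if nd['type'] in (NODE_TYPE_CLASS, NODE_TYPE_FUNCTION)]
--     adj = {m: [] for m in method_nodes}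
--     for e in graph_edges:
--         if e['type'] == EDGE_TYPE_INVOKES:
--             src = e['src']; dst = e['dst']
--             if src in adj:
--                 adj[src].append(dst)
--     return method_nodes, adj
-- ===== SOURCE B (Python) =====
-- NODE_TYPE_CLASS = 'class'
-- NODE_TYPE_FUNCTION = 'function'
-- EDGE_TYPE_INVOKES = 'invokes'
--
-- def derive_call_graph(graph_nodes, graph_edges):
--     method_nodes = [nid for nid, nd in graph_nodes.items() if nd['type'] in (NODE_TYPE_CLASS, NODE_TYPE_FUNCTION)]
--     invokes = [(e['src'], e['dst']) for e in graph_edges if e['type'] == EDGE_TYPE_INVOKES]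
--     adj = {m: [dst for src, dst in invokes if src == m] for m in method_nodes}
--     return method_nodes, adj
-- ===== Notes on version B (the rewrite author's own statement) =====
-- stated objective: alternative
-- what changed: A builds the adjacency dict with one index-driven pass over the edges, mutating per-key lists; B first extracts the (src,dst) pairs of invoke edges and then builds each node's list by a per-node scan of that pair list (a dict comprehension), so no mutable dict is threaded through the edge loop.
import Mathlib
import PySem

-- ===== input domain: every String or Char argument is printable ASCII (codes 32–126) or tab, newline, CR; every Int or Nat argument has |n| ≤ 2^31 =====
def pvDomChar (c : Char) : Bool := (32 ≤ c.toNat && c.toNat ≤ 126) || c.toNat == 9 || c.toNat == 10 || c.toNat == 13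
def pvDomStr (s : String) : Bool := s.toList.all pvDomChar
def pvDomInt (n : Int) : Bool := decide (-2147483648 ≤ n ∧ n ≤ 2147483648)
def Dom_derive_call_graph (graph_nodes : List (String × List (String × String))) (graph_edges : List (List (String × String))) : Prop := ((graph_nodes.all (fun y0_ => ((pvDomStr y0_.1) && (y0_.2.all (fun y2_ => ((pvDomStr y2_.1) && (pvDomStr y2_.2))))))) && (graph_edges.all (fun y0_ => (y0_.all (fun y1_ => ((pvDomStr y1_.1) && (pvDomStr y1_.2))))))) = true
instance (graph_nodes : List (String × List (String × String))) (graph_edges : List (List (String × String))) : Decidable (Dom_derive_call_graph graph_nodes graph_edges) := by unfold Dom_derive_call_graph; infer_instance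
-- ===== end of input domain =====

-- B replaces A's single mutating pass over the edges by extracting the invoke (src,dst)
-- pairs once and then building each method node's successor list by a per-node scan
-- (alternative decomposition, same return value; not claimed faster).

-- ===== PORT A =====
-- method_nodes = [nid for nid, nd in graph_nodes.items() if nd['type'] in ('class','function')]
-- (the dict parameters arrive as association lists; PySem.Dict.ofList is dict(pairs))
def pvMethodNodes (graph_nodes : List (String × List (String × String))) : List String :=
  ((PySem.Dict.ofList graph_nodes).items.filter
    (fun p => ((PySem.Dict.ofList p.2).getD "type" "" == "class") ||
              ((PySem.Dict.ofList p.2).getD "type" "" == "function"))).map (·.1)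

-- the body of A's 'for e in graph_edges' loop (getD is exact under Pre_: the keys exist)
def pvLoopA (d : PySem.Dict String (List String)) (e : List (String × String)) :
    PySem.Dict String (List String) :=
  let ed := PySem.Dict.ofList e
  if ed.getD "type" "" == "invokes" then
    let src := ed.getD "src" ""
    let dst := ed.getD "dst" ""
    if d.contains src then d.modify src [] (fun v => v ++ [dst]) else d
  else d

def derive_call_graph (graph_nodes : List (String × List (String × String))) (graph_edges : List (List (String × String))) : List String × (List (String × List String)) :=
  let method_nodes := pvMethodNodes graph_nodes
  let adj0 : PySem.Dict String (List String) :=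
    method_nodes.foldl (fun d m => d.insert m []) PySem.Dict.empty
  let adj := graph_edges.foldl pvLoopA adj0
  (method_nodes, adj.items)

-- ===== PORT B =====
-- invokes = [(e['src'], e['dst']) for e in graph_edges if e['type'] == 'invokes']
def pvInvokes (graph_edges : List (List (String × String))) : List (String × String) :=
  (graph_edges.filter (fun e => (PySem.Dict.ofList e).getD "type" "" == "invokes")).map
    (fun e => ((PySem.Dict.ofList e).getD "src" "", (PySem.Dict.ofList e).getD "dst" ""))

def derive_call_graph_alt (graph_nodes : List (String × List (String × String))) (graph_edges : List (List (String × String))) : List String × (List (String × List String)) :=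
  let method_nodes := pvMethodNodes graph_nodes
  let invokes := pvInvokes graph_edges
  (method_nodes,
   method_nodes.map (fun m => (m, (invokes.filter (fun p => p.1 == m)).map (·.2))))

-- ===== PRECONDITION & SPEC =====
-- Pre_ excludes exactly the inputs where Python A raises KeyError: a node dict without
-- a 'type' key, an edge dict without a 'type' key, or an invoke edge missing 'src'/'dst'.
def Pre_derive_call_graph (graph_nodes : List (String × List (String × String))) (graph_edges : List (List (String × String))) : Prop :=
  (∀ p ∈ graph_nodes, "type" ∈ p.2.map Prod.fst) ∧
  (∀ e ∈ graph_edges, "type" ∈ e.map Prod.fst ∧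
    ((PySem.Dict.ofList e).getD "type" "" = "invokes" →
      "src" ∈ e.map Prod.fst ∧ "dst" ∈ e.map Prod.fst))
instance (graph_nodes : List (String × List (String × String))) (graph_edges : List (List (String × String))) : Decidable (Pre_derive_call_graph graph_nodes graph_edges) := by unfold Pre_derive_call_graph; infer_instance

def pvWitness_derive_call_graph : (List (String × List (String × String))) × (List (List (String × String))) :=
  ([("f", [("type", "function")]), ("C", [("type", "class")]), ("v", [("type", "var")])],
   [[("type", "invokes"), ("src", "f"), ("dst", "C")], [("type", "contains")]])

def Spec_derive_call_graph (graph_nodes : List (String × List (String × String))) (graph_edges : List (List (String × String))) (out : List String × (List (String × List String))) : Prop := out = derive_call_graph_alt graph_nodes graph_edges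
instance (graph_nodes : List (String × List (String × String))) (graph_edges : List (List (String × String))) (out : List String × (List (String × List String))) : Decidable (Spec_derive_call_graph graph_nodes graph_edges out) := by unfold Spec_derive_call_graph; infer_instance

-- ===== CLAIM (what is proved, stated in full; the proofs are below) =====
def Claim_equal_derive_call_graph : Prop := ∀ (graph_nodes : List (String × List (String × String))) (graph_edges : List (List (String × String))), Dom_derive_call_graph graph_nodes graph_edges → Pre_derive_call_graph graph_nodes graph_edges → Spec_derive_call_graph graph_nodes graph_edges (derive_call_graph graph_nodes graph_edges)

-- ===== LEMMAS AND PROOFS =====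

theorem pvMethodNodes_nodup (gn : List (String × List (String × String))) :
    (pvMethodNodes gn).Nodup := by
  have h := PySem.Dict.nodup_keys_ofList gn
  simp only [PySem.Dict.keys] at h
  exact h.sublist (List.filter_sublist.map _)

theorem pvLoopA_keys (d : PySem.Dict String (List String)) (e : List (String × String)) :
    (pvLoopA d e).keys = d.keys := by
  simp only [pvLoopA]
  split_ifs <;> simp [PySem.Dict.keys_modify, PySem.Dict.keys_insert_of_contains, *]

theorem pv_foldl_keys (l : List (List (String × String))) (d : PySem.Dict String (List String)) :
    (l.foldl pvLoopA d).keys = d.keys := by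
  induction l generalizing d with
  | nil => rfl
  | cons e l ih => rw [List.foldl_cons, ih, pvLoopA_keys]

theorem pv_foldl_getD (l : List (List (String × String))) (d : PySem.Dict String (List String))
    (k : String) (hk : d.contains k = true) :
    (l.foldl pvLoopA d).getD k [] =
      d.getD k [] ++
        ((l.filter (fun e => ((PySem.Dict.ofList e).getD "type" "" == "invokes") &&
            ((PySem.Dict.ofList e).getD "src" "" == k))).map
          (fun e => (PySem.Dict.ofList e).getD "dst" "")) := by
  induction l generalizing d with
  | nil => simp
  | cons e l ih =>
    have hck : (pvLoopA d e).contains k = true := by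
      rw [PySem.Dict.contains_eq_decide_mem_keys, pvLoopA_keys,
        ← PySem.Dict.contains_eq_decide_mem_keys]; exact hk
    rw [List.foldl_cons, ih _ hck, List.filter_cons]
    by_cases hinv : (PySem.Dict.ofList e).getD "type" "" == "invokes"
    · by_cases hsrc : (PySem.Dict.ofList e).getD "src" "" = k
      · simp [pvLoopA, hinv, hsrc, hk, List.append_assoc]
      · have hne : k ≠ (PySem.Dict.ofList e).getD "src" "" := fun h => hsrc h.symm
        have hb : ((PySem.Dict.ofList e).getD "src" "" == k) = false := by
          simpa using hsrc
        simp only [pvLoopA, hinv, if_true, hb, Bool.and_false, Bool.false_eq_true,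
          if_false]
        split_ifs with hc
        · simp [PySem.Dict.getD_modify, hne]
        · rfl
    · have hb : ((PySem.Dict.ofList e).getD "type" "" == "invokes") = false := by
        simpa using hinv
    
      simp [pvLoopA, hb]

theorem pv_invokes_filter (ge : List (List (String × String))) (m : String) :
    ((pvInvokes ge).filter (fun p => p.1 == m)).map (·.2) =
      ((ge.filter (fun e => ((PySem.Dict.ofList e).getD "type" "" == "invokes") &&
          ((PySem.Dict.ofList e).getD "src" "" == m))).map
        (fun e => (PySem.Dict.ofList e).getD "dst" "")) := by
  simp [pvInvokes, List.filter_map, List.map_map, List.filter_filter, Function.comp_def,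
    Bool.and_comm]

-- ===== VERDICT (by name: the statement is the Claim_ definition above) =====
theorem derive_call_graph_spec : Claim_equal_derive_call_graph := by
  intro gn ge _ _
  unfold Spec_derive_call_graph derive_call_graph derive_call_graph_alt
  have hnd := pvMethodNodes_nodup gn
  have hitems0 : ((pvMethodNodes gn).foldl (fun d m => d.insert m ([] : List String)) PySem.Dict.empty).items
      = (pvMethodNodes gn).map (fun m => (m, ([] : List String))) := by
    have h := PySem.Dict.items_foldl_insert_fresh (l := pvMethodNodes gn)
      (k := fun m => m) (v := fun _ => ([] : List String)) (d := PySem.Dict.empty)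
      (by intro a _; simp [PySem.Dict.contains_empty]) (by simpa using hnd)
    simpa using h
  have hkeys0 : ((pvMethodNodes gn).foldl (fun d m => d.insert m ([] : List String)) PySem.Dict.empty).keys
      = pvMethodNodes gn := by
    simp [PySem.Dict.keys, hitems0, Function.comp_def]
  have hkeysF : (ge.foldl pvLoopA ((pvMethodNodes gn).foldl (fun d m => d.insert m ([] : List String)) PySem.Dict.empty)).keys
      = pvMethodNodes gn := by rw [pv_foldl_keys, hkeys0]
  have hndF : (ge.foldl pvLoopA ((pvMethodNodes gn).foldl (fun d m => d.insert m ([] : List String)) PySem.Dict.empty)).keys.Nodup := by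
    rw [hkeysF]; exact hnd
  have hitemsF := PySem.Dict.items_eq_map_keys _ hndF ([] : List String)
  refine Prod.ext rfl ?_
  dsimp only
  rw [hitemsF, hkeysF]
  refine List.map_congr_left ?_
  intro m hm
  have hc0 : ((pvMethodNodes gn).foldl (fun d m => d.insert m ([] : List String)) PySem.Dict.empty).contains m = true := by
    rw [PySem.Dict.contains_eq_decide_mem_keys, hkeys0]; simpa using hm
  have hg0 : ((pvMethodNodes gn).foldl (fun d m => d.insert m ([] : List String)) PySem.Dict.empty).getD m [] = [] := by
    have hmem : (m, ([] : List String)) ∈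
        ((pvMethodNodes gn).foldl (fun d m => d.insert m ([] : List String)) PySem.Dict.empty).items := by
      rw [hitems0]; exact List.mem_map.mpr ⟨m, hm, rfl⟩
    exact PySem.Dict.getD_of_mem_items _ hmem (by rw [hkeys0]; exact hnd) []
  rw [pv_foldl_getD ge _ m hc0, hg0, pv_invokes_filter]
  simp
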